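-- pv_equiv track=rewrite | github.com/rodehyde/arc-agi-solver | src/categories/transform_features.py | _is_rect_border
-- ===== SOURCE A (Python) =====
-- def _is_rect_border(cells: list[tuple[int, int]]) -> bool:
--     """True if cells form exactly the perimeter of an axis-aligned rectangle."""
--     if len(cells) < 4:
--         return False
--     rows = [r for r, c in cells]
--     cols = [c for r, c in cells]
--     r0, r1 = min(rows), max(rows)
--     c0, c1 = min(cols), max(cols)
--     if r0 == r1 or c0 == c1:
--         return False  # degenerate (single row or column = a line)
--     expected: set[tuple[int, int]] = set()
--     for c in range(c0, c1 + 1):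
--         expected.add((r0, c))
--         expected.add((r1, c))
--     for r in range(r0 + 1, r1):
--         expected.add((r, c0))
--         expected.add((r, c1))
--     return set(cells) == expected
-- ===== SOURCE B (Python) =====
-- def _is_rect_border(cells: list[tuple[int, int]]) -> bool:
--     """True if cells form exactly the perimeter of an axis-aligned rectangle."""
--     if len(cells) < 4:
--         return False
--     rows = [r for r, c in cells]
--     cols = [c for r, c in cells]
--     r0, r1 = min(rows), max(rows)
--     c0, c1 = min(cols), max(cols)
--     if r0 == r1 or c0 == c1:
--         return False
--     if any(r != r0 and r != r1 and c != c0 and c != c1 for r, c in cells):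
--         return False
--     return len(set(cells)) == 2 * (c1 - c0 + 1) + 2 * (r1 - r0 - 1)
-- ===== Notes on version B (the rewrite author's own statement) =====
-- stated objective: simpler
-- what changed: B drops A's materialized expected-perimeter set and set-equality comparison, instead checking that every cell lies on one of the four border lines and that the number of distinct cells equals the arithmetic perimeter count 2*(c1-c0+1)+2*(r1-r0-1).
import Mathlib
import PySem

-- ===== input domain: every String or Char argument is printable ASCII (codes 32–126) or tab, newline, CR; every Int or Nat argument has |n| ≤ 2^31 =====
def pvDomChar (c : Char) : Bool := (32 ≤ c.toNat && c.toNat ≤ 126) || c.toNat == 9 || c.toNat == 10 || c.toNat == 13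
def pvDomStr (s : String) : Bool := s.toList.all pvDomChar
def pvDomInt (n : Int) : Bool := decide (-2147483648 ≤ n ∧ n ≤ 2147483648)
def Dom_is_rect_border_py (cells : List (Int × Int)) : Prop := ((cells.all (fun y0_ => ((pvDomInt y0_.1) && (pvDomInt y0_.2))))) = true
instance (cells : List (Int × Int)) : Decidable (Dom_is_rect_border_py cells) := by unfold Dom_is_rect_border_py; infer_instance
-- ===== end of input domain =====

-- B replaces A's materialized expected-perimeter set and set-equality test by a per-cell
-- border-line predicate plus an arithmetic count of distinct cells (objective: simpler).

-- ===== PORT A =====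
-- A's Python sets are ported with Std.HashSet (constant-time add/membership, like Python's set);
-- the loops, branch order and added elements are exactly A's. Python's set equality
-- 'set(cells) == expected' is ported exactly as size equality plus membership inclusion.
def is_rect_border_py (cells : List (Int × Int)) : Bool :=
  if cells.length < 4 then false
  else
    let rows := cells.map (fun p => p.1)
    let cols := cells.map (fun p => p.2)
    -- min/max of a nonempty list (cells.length ≥ 4 here, so the none branch is unreachable)
    match PySem.List.min? rows (fun x => x), PySem.List.max? rows (fun x => x),
          PySem.List.min? cols (fun x => x), PySem.List.max? cols (fun x => x) with
    | some r0, some r1, some c0, some c1 =>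
      if r0 == r1 || c0 == c1 then false
      else
        let e1 : Std.HashSet (Int × Int) :=
          (PySem.List.pyRange c0 (c1 + 1) 1).foldl
            (fun (e : Std.HashSet (Int × Int)) c => (e.insert (r0, c)).insert (r1, c)) ∅
        let expected : Std.HashSet (Int × Int) :=
          (PySem.List.pyRange (r0 + 1) r1 1).foldl
            (fun (e : Std.HashSet (Int × Int)) r => (e.insert (r, c0)).insert (r, c1)) e1
        let s : Std.HashSet (Int × Int) := Std.HashSet.ofList cells
        s.size == expected.size && s.all (fun p => expected.contains p)
    | _, _, _, _ => false

-- ===== PORT B =====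
def is_rect_border_py_alt (cells : List (Int × Int)) : Bool :=
  if cells.length < 4 then false
  else
    let rows := cells.map (fun p => p.1)
    let cols := cells.map (fun p => p.2)
    match PySem.List.min? rows (fun x => x) with
    | none => false
    | some r0 =>
      match PySem.List.max? rows (fun x => x) with
      | none => false
      | some r1 =>
        match PySem.List.min? cols (fun x => x) with
        | none => false
        | some c0 =>
          match PySem.List.max? cols (fun x => x) with
          | none => false
          | some c1 =>
            if r0 == r1 || c0 == c1 then false
            else if cells.any (fun p => p.1 != r0 && p.1 != r1 && p.2 != c0 && p.2 != c1) then false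
            else PySem.Set.len (PySem.Set.ofList cells) == 2 * (c1 - c0 + 1) + 2 * (r1 - r0 - 1)

-- ===== PRECONDITION & SPEC =====
def Spec_is_rect_border_py (cells : List (Int × Int)) (out : Bool) : Prop := out = is_rect_border_py_alt cells
instance (cells : List (Int × Int)) (out : Bool) : Decidable (Spec_is_rect_border_py cells out) := by unfold Spec_is_rect_border_py; infer_instance

-- ===== CLAIM (what is proved, stated in full; the proofs are below) =====
def Claim_equal_is_rect_border_py : Prop := ∀ (cells : List (Int × Int)), Dom_is_rect_border_py cells → Spec_is_rect_border_py cells (is_rect_border_py cells)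

-- ===== LEMMAS AND PROOFS =====

-- membership in A's perimeter-building fold (two insertions per iteration)
theorem pvMemFoldPair (f g : Int → Int × Int) (l : List Int) (s : Std.HashSet (Int × Int))
    (y : Int × Int) :
    y ∈ l.foldl (fun e c => (e.insert (f c)).insert (g c)) s ↔
      y ∈ s ∨ ∃ c ∈ l, y = f c ∨ y = g c := by
  induction l generalizing s with
  | nil => simp
  | cons a t ih =>
    simp only [List.foldl_cons, ih, Std.HashSet.mem_insert, beq_iff_eq, List.mem_cons]
    constructor
    · rintro ((h | h | h) | ⟨c, hc, h⟩)
      · exact Or.inr ⟨a, Or.inl rfl, Or.inr h.symm⟩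
      · exact Or.inr ⟨a, Or.inl rfl, Or.inl h.symm⟩
      · exact Or.inl h
      · exact Or.inr ⟨c, Or.inr hc, h⟩
    · rintro (h | ⟨c, (rfl | hc), h⟩)
      · exact Or.inl (Or.inr (Or.inr h))
      · rcases h with h | h
        · exact Or.inl (Or.inr (Or.inl h.symm))
        · exact Or.inl (Or.inl h.symm)
      · exact Or.inr ⟨c, hc, h⟩

-- the explicit perimeter as a Finset (proof-only helper; not used by the ports)
noncomputable def pvPerim (r0 r1 c0 c1 : Int) : Finset (Int × Int) :=
  (((Finset.Icc c0 c1).image (fun c => (r0, c)) ∪ (Finset.Icc c0 c1).image (fun c => (r1, c))) ∪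
    (Finset.Ioo r0 r1).image (fun r => (r, c0))) ∪ (Finset.Ioo r0 r1).image (fun r => (r, c1))

theorem pvMemPerim (r0 r1 c0 c1 : Int) (y : Int × Int) :
    y ∈ pvPerim r0 r1 c0 c1 ↔
      ((y.1 = r0 ∨ y.1 = r1) ∧ c0 ≤ y.2 ∧ y.2 ≤ c1) ∨
      ((y.2 = c0 ∨ y.2 = c1) ∧ r0 < y.1 ∧ y.1 < r1) := by
  rcases y with ⟨r, c⟩
  simp only [pvPerim, Finset.mem_union, Finset.mem_image, Finset.mem_Icc, Finset.mem_Ioo,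
    Prod.mk.injEq]
  constructor
  · rintro (((⟨x, hx, h1, h2⟩ | ⟨x, hx, h1, h2⟩) | ⟨x, hx, h1, h2⟩) | ⟨x, hx, h1, h2⟩) <;>
      subst h1 <;> subst h2 <;> tauto
  · rintro (⟨h, hc⟩ | ⟨h, hr⟩)
    · rcases h with h | h
      · exact Or.inl (Or.inl (Or.inl ⟨c, hc, h.symm, rfl⟩))
      · exact Or.inl (Or.inl (Or.inr ⟨c, hc, h.symm, rfl⟩))
    · rcases h with h | h
      · exact Or.inl (Or.inr ⟨r, hr, rfl, h.symm⟩)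
      · exact Or.inr ⟨r, hr, rfl, h.symm⟩

theorem pvCardPerim (r0 r1 c0 c1 : Int) (hr : r0 < r1) (hc : c0 < c1) :
    ((pvPerim r0 r1 c0 c1).card : Int) = 2 * (c1 - c0 + 1) + 2 * (r1 - r0 - 1) := by
  have hinj1 : Function.Injective (fun c : Int => ((r0, c) : Int × Int)) := by
    intro a b h; simpa using h
  have hinj2 : Function.Injective (fun c : Int => ((r1, c) : Int × Int)) := by
    intro a b h; simpa using h
  have hinj3 : Function.Injective (fun r : Int => ((r, c0) : Int × Int)) := by
    intro a b h; simpa using h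
  have hinj4 : Function.Injective (fun r : Int => ((r, c1) : Int × Int)) := by
    intro a b h; simpa using h
  have d1 : Disjoint ((Finset.Icc c0 c1).image (fun c => ((r0, c) : Int × Int)))
      ((Finset.Icc c0 c1).image (fun c => ((r1, c) : Int × Int))) := by
    rw [Finset.disjoint_left]
    rintro ⟨r, c⟩ h1 h2
    simp only [Finset.mem_image, Prod.mk.injEq] at h1 h2
    obtain ⟨x, _, hx, _⟩ := h1; obtain ⟨x', _, hx', _⟩ := h2
    omega
  have d2 : Disjoint ((Finset.Icc c0 c1).image (fun c => ((r0, c) : Int × Int)) ∪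
      (Finset.Icc c0 c1).image (fun c => ((r1, c) : Int × Int)))
      ((Finset.Ioo r0 r1).image (fun r => ((r, c0) : Int × Int))) := by
    rw [Finset.disjoint_left]
    rintro ⟨r, c⟩ h1 h2
    simp only [Finset.mem_union, Finset.mem_image, Finset.mem_Ioo, Prod.mk.injEq] at h1 h2
    obtain ⟨x, hx, hx1, _⟩ := h2
    rcases h1 with ⟨x', _, hx', _⟩ | ⟨x', _, hx', _⟩ <;> omega
  have d3 : Disjoint (((Finset.Icc c0 c1).image (fun c => ((r0, c) : Int × Int)) ∪
      (Finset.Icc c0 c1).image (fun c => ((r1, c) : Int × Int))) ∪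
      (Finset.Ioo r0 r1).image (fun r => ((r, c0) : Int × Int)))
      ((Finset.Ioo r0 r1).image (fun r => ((r, c1) : Int × Int))) := by
    rw [Finset.disjoint_left]
    rintro ⟨r, c⟩ h1 h2
    simp only [Finset.mem_union, Finset.mem_image, Finset.mem_Ioo, Finset.mem_Icc,
      Prod.mk.injEq] at h1 h2
    obtain ⟨x, hx, hx1, hx2⟩ := h2
    rcases h1 with (⟨x', _, hx', hc'⟩ | ⟨x', _, hx', hc'⟩) | ⟨x', hx', hr', hc'⟩ <;> omega
  rw [pvPerim, Finset.card_union_of_disjoint d3, Finset.card_union_of_disjoint d2,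
    Finset.card_union_of_disjoint d1, Finset.card_image_of_injective _ hinj1,
    Finset.card_image_of_injective _ hinj2, Finset.card_image_of_injective _ hinj3,
    Finset.card_image_of_injective _ hinj4, Int.card_Icc, Int.card_Ioo]
  push_cast
  omega

theorem pvNodupToList (m : Std.HashSet (Int × Int)) : m.toList.Nodup := by
  have := Std.HashSet.distinct_toList (m := m)
  exact this.imp (fun h => by simpa using h)

-- the size of a HashSet is the cardinality of the Finset of its members
theorem pvSizeEqCard (m : Std.HashSet (Int × Int)) : m.size = m.toList.toFinset.card := by
  rw [List.toFinset_card_of_nodup (pvNodupToList m), Std.HashSet.length_toList]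

-- the core equivalence, under the facts the shared prologue establishes
theorem pvMain (cells : List (Int × Int)) (r0 r1 c0 c1 : Int)
    (hr : r0 < r1) (hc : c0 < c1)
    (hb : ∀ p ∈ cells, r0 ≤ p.1 ∧ p.1 ≤ r1 ∧ c0 ≤ p.2 ∧ p.2 ≤ c1) :
    (((Std.HashSet.ofList cells).size ==
        ((PySem.List.pyRange (r0 + 1) r1 1).foldl
          (fun (e : Std.HashSet (Int × Int)) r => (e.insert (r, c0)).insert (r, c1))
          ((PySem.List.pyRange c0 (c1 + 1) 1).foldl
            (fun (e : Std.HashSet (Int × Int)) c => (e.insert (r0, c)).insert (r1, c)) ∅)).size) &&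
      (Std.HashSet.ofList cells).all (fun p =>
        ((PySem.List.pyRange (r0 + 1) r1 1).foldl
          (fun (e : Std.HashSet (Int × Int)) r => (e.insert (r, c0)).insert (r, c1))
          ((PySem.List.pyRange c0 (c1 + 1) 1).foldl
            (fun (e : Std.HashSet (Int × Int)) c => (e.insert (r0, c)).insert (r1, c)) ∅)).contains p)) =
      ((cells.all (fun p => !(p.1 != r0 && p.1 != r1 && p.2 != c0 && p.2 != c1))) &&
        (PySem.Set.len (PySem.Set.ofList cells) == 2 * (c1 - c0 + 1) + 2 * (r1 - r0 - 1))) := by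
  set S := Std.HashSet.ofList cells with hS
  set E := (PySem.List.pyRange (r0 + 1) r1 1).foldl
      (fun (e : Std.HashSet (Int × Int)) r => (e.insert (r, c0)).insert (r, c1))
      ((PySem.List.pyRange c0 (c1 + 1) 1).foldl
        (fun (e : Std.HashSet (Int × Int)) c => (e.insert (r0, c)).insert (r1, c)) ∅) with hE
  have hmemE : ∀ y, y ∈ E ↔ y ∈ pvPerim r0 r1 c0 c1 := by
    rintro ⟨a, b⟩
    rw [hE, pvMemFoldPair, pvMemFoldPair, pvMemPerim]
    simp only [PySem.List.mem_pyRange_one, Std.HashSet.not_mem_empty, false_or,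
      Prod.mk.injEq]
    constructor
    · rintro (⟨x, hx, ⟨rfl, rfl⟩ | ⟨rfl, rfl⟩⟩ | ⟨x, hx, ⟨rfl, rfl⟩ | ⟨rfl, rfl⟩⟩)
      · exact Or.inl ⟨Or.inl rfl, by omega⟩
      · exact Or.inl ⟨Or.inr rfl, by omega⟩
      · exact Or.inr ⟨Or.inl rfl, by omega⟩
      · exact Or.inr ⟨Or.inr rfl, by omega⟩
    · rintro (⟨ha, hb2⟩ | ⟨hb2, ha⟩)
      · rcases ha with rfl | rfl
        · exact Or.inl ⟨b, by omega, Or.inl ⟨rfl, rfl⟩⟩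
        · exact Or.inl ⟨b, by omega, Or.inr ⟨rfl, rfl⟩⟩
      · rcases hb2 with rfl | rfl
        · exact Or.inr ⟨a, by omega, Or.inl ⟨rfl, rfl⟩⟩
        · exact Or.inr ⟨a, by omega, Or.inr ⟨rfl, rfl⟩⟩
  have hmemS : ∀ y, y ∈ S ↔ y ∈ cells := by
    intro y; rw [hS, Std.HashSet.mem_ofList]; simp
  have hEsize : (E.size : Int) = 2 * (c1 - c0 + 1) + 2 * (r1 - r0 - 1) := by
    rw [pvSizeEqCard]
    have : E.toList.toFinset = pvPerim r0 r1 c0 c1 := by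
      apply Finset.ext; intro y
      rw [List.mem_toFinset, Std.HashSet.mem_toList]
      exact hmemE y
    rw [this]
    exact pvCardPerim r0 r1 c0 c1 hr hc
  have hSsize : (S.size : Int) = PySem.Set.len (PySem.Set.ofList cells) := by
    rw [pvSizeEqCard]
    have h1 : S.toList.toFinset = cells.toFinset := by
      apply Finset.ext; intro y
      rw [List.mem_toFinset, List.mem_toFinset, Std.HashSet.mem_toList]
      exact hmemS y
    have h2 : (PySem.Set.ofList cells).toFinset = cells.toFinset := by
      apply Finset.ext; intro y
      rw [List.mem_toFinset, List.mem_toFinset]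
      exact PySem.Set.mem_ofList cells y
    rw [h1, ← h2, PySem.Set.len,
      List.toFinset_card_of_nodup (PySem.Set.nodup_ofList cells)]
  by_cases hall : ∀ p ∈ cells, p.1 = r0 ∨ p.1 = r1 ∨ p.2 = c0 ∨ p.2 = c1
  · -- every cell lies on a border line: S ⊆ E, so both sides reduce to the size comparison
    have hallA : S.all (fun p => E.contains p) = true := by
      rw [Std.HashSet.all_eq_true_iff_forall_mem]
      intro y hy
      rw [← Std.HashSet.mem_iff_contains, hmemE, pvMemPerim]
      have hy' := (hmemS y).mp hy
      have hby := hb y hy'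
      rcases hall y hy' with h | h | h | h <;> [exact Or.inl ⟨Or.inl h, by omega⟩;
        exact Or.inl ⟨Or.inr h, by omega⟩; skip; skip]
      · by_cases hr' : y.1 = r0 ∨ y.1 = r1
        · exact Or.inl ⟨hr', by omega⟩
        · exact Or.inr ⟨Or.inl h, by omega⟩
      · by_cases hr' : y.1 = r0 ∨ y.1 = r1
        · exact Or.inl ⟨hr', by omega⟩
        · exact Or.inr ⟨Or.inr h, by omega⟩
    have hallB : (cells.all (fun p => !(p.1 != r0 && p.1 != r1 && p.2 != c0 && p.2 != c1))) = true := by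
      rw [List.all_eq_true]
      intro p hp
      rcases hall p hp with h | h | h | h <;> simp [h]
    rw [hallA, hallB, Bool.and_true, Bool.true_and]
    by_cases hsz : S.size = E.size
    · rw [beq_iff_eq.mpr hsz, eq_comm, beq_iff_eq, ← hSsize, ← hEsize, hsz]
    · rw [beq_eq_false_iff_ne.mpr hsz, eq_comm, beq_eq_false_iff_ne]
      intro hlen
      apply hsz
      have : (S.size : Int) = (E.size : Int) := by rw [hSsize, hlen, hEsize]
      exact_mod_cast this
  · -- some cell is off all four border lines: both sides are false
    push Not at hall
    obtain ⟨p, hp, h1, h2, h3, h4⟩ := hall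
    have hallB : (cells.all (fun p => !(p.1 != r0 && p.1 != r1 && p.2 != c0 && p.2 != c1))) = false := by
      rw [List.all_eq_false]
      exact ⟨p, hp, by simp [h1, h2, h3, h4]⟩
    have hallA : S.all (fun p => E.contains p) = false := by
      rw [Std.HashSet.all_eq_false_iff_exists_mem]
      refine ⟨p, (hmemS p).mpr hp, ?_⟩
      rw [Bool.eq_false_iff]
      intro hcon
      have hpm : p ∈ E := Std.HashSet.mem_iff_contains.mpr hcon
      rw [hmemE, pvMemPerim] at hpm
      rcases hpm with ⟨h | h, _⟩ | ⟨h | h, _⟩ <;> [exact h1 h; exact h2 h; exact h3 h; exact h4 h]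
    rw [hallA, hallB, Bool.and_false, Bool.false_and]

-- ===== VERDICT (by name: the statement is the Claim_ definition above) =====
theorem is_rect_border_py_spec : Claim_equal_is_rect_border_py := by
  intro cells _
  unfold Spec_is_rect_border_py is_rect_border_py is_rect_border_py_alt
  by_cases h4 : cells.length < 4
  · simp [h4]
  · simp only [h4, if_false]
    have hne : cells ≠ [] := by
      intro h; rw [h] at h4; simp at h4
    have hrne : cells.map (fun p => p.1) ≠ [] := by simpa using hne
    have hcne : cells.map (fun p => p.2) ≠ [] := by simpa using hne
    obtain ⟨r0, hr0⟩ := Option.ne_none_iff_exists'.mp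
      (fun h => hrne ((PySem.List.min?_eq_none_iff (cells.map (fun p => p.1)) (fun x : Int => x)).mp h))
    obtain ⟨r1, hr1⟩ := Option.ne_none_iff_exists'.mp
      (fun h => hrne ((PySem.List.max?_eq_none_iff (cells.map (fun p => p.1)) (fun x : Int => x)).mp h))
    obtain ⟨c0, hc0⟩ := Option.ne_none_iff_exists'.mp
      (fun h => hcne ((PySem.List.min?_eq_none_iff (cells.map (fun p => p.2)) (fun x : Int => x)).mp h))
    obtain ⟨c1, hc1⟩ := Option.ne_none_iff_exists'.mp
      (fun h => hcne ((PySem.List.max?_eq_none_iff (cells.map (fun p => p.2)) (fun x : Int => x)).mp h))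
    rw [hr0, hr1, hc0, hc1]
    by_cases hdeg : (r0 == r1 || c0 == c1) = true
    · simp only [hdeg, if_true]
    · simp only [hdeg]
      have hr0le : ∀ p ∈ cells, r0 ≤ p.1 := by
        intro p hp
        exact PySem.List.min?_isMin hr0 p.1 (List.mem_map_of_mem hp)
      have hr1ge : ∀ p ∈ cells, p.1 ≤ r1 := by
        intro p hp
        exact PySem.List.max?_isMax hr1 p.1 (List.mem_map_of_mem hp)
      have hc0le : ∀ p ∈ cells, c0 ≤ p.2 := by
        intro p hp
        exact PySem.List.min?_isMin hc0 p.2 (List.mem_map_of_mem hp)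
      have hc1ge : ∀ p ∈ cells, p.2 ≤ c1 := by
        intro p hp
        exact PySem.List.max?_isMax hc1 p.2 (List.mem_map_of_mem hp)
      have hmem : ∃ p, p ∈ cells := by
        cases cells with
        | nil => exact absurd rfl hne
        | cons a t => exact ⟨a, List.mem_cons_self⟩
      obtain ⟨p0, hp0⟩ := hmem
      have hrr : r0 ≤ r1 := le_trans (hr0le p0 hp0) (hr1ge p0 hp0)
      have hcc : c0 ≤ c1 := le_trans (hc0le p0 hp0) (hc1ge p0 hp0)
      simp only [Bool.or_eq_true, beq_iff_eq, not_or] at hdeg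
      have hr : r0 < r1 := lt_of_le_of_ne hrr hdeg.1
      have hc : c0 < c1 := lt_of_le_of_ne hcc hdeg.2
      have hb : ∀ p ∈ cells, r0 ≤ p.1 ∧ p.1 ≤ r1 ∧ c0 ≤ p.2 ∧ p.2 ≤ c1 := fun p hp =>
        ⟨hr0le p hp, hr1ge p hp, hc0le p hp, hc1ge p hp⟩
      rw [pvMain cells r0 r1 c0 c1 hr hc hb]
      cases hany : cells.any (fun p => p.1 != r0 && p.1 != r1 && p.2 != c0 && p.2 != c1) with
      | true => simp [List.all_eq_not_any_not, hany]
      | false => simp [List.all_eq_not_any_not, hany]
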